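-- pv_equiv track=rewrite | github.com/AmrasElensar/ShadowrunRAG | tools/chunk_analyzer.py | _get_size_distribution
-- ===== SOURCE A (Python) =====
-- def _get_size_distribution(word_counts):
--     """Analyze distribution of chunk sizes."""
--     bins = {
--         "very_small (0-100)": sum(1 for x in word_counts if x < 100),
--         "small (100-300)": sum(1 for x in word_counts if 100 <= x < 300),
--         "medium (300-600)": sum(1 for x in word_counts if 300 <= x < 600),
--         "large (600-1000)": sum(1 for x in word_counts if 600 <= x < 1000),
--         "very_large (1000+)": sum(1 for x in word_counts if x >= 1000)
--     }
--     return bins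
-- ===== SOURCE B (Python) =====
-- def _get_size_distribution(word_counts):
--     """Analyze distribution of chunk sizes (single pass)."""
--     bins = {
--         "very_small (0-100)": 0,
--         "small (100-300)": 0,
--         "medium (300-600)": 0,
--         "large (600-1000)": 0,
--         "very_large (1000+)": 0,
--     }
--     for x in word_counts:
--         if x < 100:
--             bins["very_small (0-100)"] += 1
--         elif x < 300:
--             bins["small (100-300)"] += 1
--         elif x < 600:
--             bins["medium (300-600)"] += 1
--         elif x < 1000:
--             bins["large (600-1000)"] += 1
--         else:
--             bins["very_large (1000+)"] += 1
--     return bins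
-- ===== Notes on version B (the rewrite author's own statement) =====
-- stated objective: alternative
-- what changed: Replaces A's five separate generator scans (one per bucket) with a single pass over word_counts that classifies each value once via an if/elif chain and increments the matching counter.
import Mathlib
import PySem

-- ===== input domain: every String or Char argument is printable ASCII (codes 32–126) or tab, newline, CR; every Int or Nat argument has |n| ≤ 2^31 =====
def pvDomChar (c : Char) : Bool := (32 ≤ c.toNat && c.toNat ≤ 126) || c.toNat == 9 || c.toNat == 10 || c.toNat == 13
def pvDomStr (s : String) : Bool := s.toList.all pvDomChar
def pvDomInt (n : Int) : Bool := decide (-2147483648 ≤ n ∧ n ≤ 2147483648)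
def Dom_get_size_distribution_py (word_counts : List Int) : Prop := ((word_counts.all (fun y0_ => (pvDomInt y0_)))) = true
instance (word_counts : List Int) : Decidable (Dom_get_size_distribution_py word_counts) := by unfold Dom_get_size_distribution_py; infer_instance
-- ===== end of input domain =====

-- B replaces A's five separate scans with a single classifying pass over word_counts (objective: alternative decomposition).

-- ===== PORT A =====
-- Each dict entry is 'sum(1 for x in word_counts if <cond>)', ported as a fold counting that condition.
def get_size_distribution_py (word_counts : List Int) : List (String × Int) :=
  [("very_small (0-100)", word_counts.foldl (fun a x => if x < 100 then a + 1 else a) 0),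
   ("small (100-300)", word_counts.foldl (fun a x => if 100 ≤ x ∧ x < 300 then a + 1 else a) 0),
   ("medium (300-600)", word_counts.foldl (fun a x => if 300 ≤ x ∧ x < 600 then a + 1 else a) 0),
   ("large (600-1000)", word_counts.foldl (fun a x => if 600 ≤ x ∧ x < 1000 then a + 1 else a) 0),
   ("very_large (1000+)", word_counts.foldl (fun a x => if x ≥ 1000 then a + 1 else a) 0)]

-- ===== PORT B =====
-- One pass: the if/elif chain updates one of five counters per element.
def pvBStep (s : Int × Int × Int × Int × Int) (x : Int) : Int × Int × Int × Int × Int :=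
  if x < 100 then (s.1 + 1, s.2.1, s.2.2.1, s.2.2.2.1, s.2.2.2.2)
  else if x < 300 then (s.1, s.2.1 + 1, s.2.2.1, s.2.2.2.1, s.2.2.2.2)
  else if x < 600 then (s.1, s.2.1, s.2.2.1 + 1, s.2.2.2.1, s.2.2.2.2)
  else if x < 1000 then (s.1, s.2.1, s.2.2.1, s.2.2.2.1 + 1, s.2.2.2.2)
  else (s.1, s.2.1, s.2.2.1, s.2.2.2.1, s.2.2.2.2 + 1)

def get_size_distribution_py_alt (word_counts : List Int) : List (String × Int) :=
  let s := word_counts.foldl pvBStep (0, 0, 0, 0, 0)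
  [("very_small (0-100)", s.1),
   ("small (100-300)", s.2.1),
   ("medium (300-600)", s.2.2.1),
   ("large (600-1000)", s.2.2.2.1),
   ("very_large (1000+)", s.2.2.2.2)]

-- ===== PRECONDITION & SPEC =====
def Spec_get_size_distribution_py (word_counts : List Int) (out : List (String × Int)) : Prop := out = get_size_distribution_py_alt word_counts
instance (word_counts : List Int) (out : List (String × Int)) : Decidable (Spec_get_size_distribution_py word_counts out) := by unfold Spec_get_size_distribution_py; infer_instance

-- ===== CLAIM (what is proved, stated in full; the proofs are below) =====
def Claim_equal_get_size_distribution_py : Prop := ∀ (word_counts : List Int), Dom_get_size_distribution_py word_counts → Spec_get_size_distribution_py word_counts (get_size_distribution_py word_counts)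

-- ===== LEMMAS AND PROOFS =====
theorem pvBStep_foldl (wc : List Int) (a b c d e : Int) :
    wc.foldl pvBStep (a, b, c, d, e) =
      (wc.foldl (fun a x => if x < 100 then a + 1 else a) a,
       wc.foldl (fun a x => if 100 ≤ x ∧ x < 300 then a + 1 else a) b,
       wc.foldl (fun a x => if 300 ≤ x ∧ x < 600 then a + 1 else a) c,
       wc.foldl (fun a x => if 600 ≤ x ∧ x < 1000 then a + 1 else a) d,
       wc.foldl (fun a x => if x ≥ 1000 then a + 1 else a) e) := by
  induction wc generalizing a b c d e with
  | nil => rfl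
  | cons x xs ih =>
    simp only [List.foldl_cons, pvBStep]
    split_ifs <;> first | exact ih .. | omega

-- ===== VERDICT (by name: the statement is the Claim_ definition above) =====
theorem get_size_distribution_py_spec : Claim_equal_get_size_distribution_py := by
  intro wc _
  unfold Spec_get_size_distribution_py get_size_distribution_py get_size_distribution_py_alt
  rw [pvBStep_foldl]
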